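-- pv_equiv track=rewrite | github.com/EliasAroni2000/automatas | Aroni-tp1-v2.py | tokenElse
-- ===== SOURCE A (Python) =====
-- estado_final = "estado final"
--
-- estadoNoFinal = "estado no aceptado"
--
-- estadoTrampa = "estado trampa"
--
-- def tokenElse(lexema):
--     estado = 0
--     estadoFinal = [4]
--     caracter = {0:{'e':1},1:{'l':2},2:{'s':3},3:{'e':4},4:{}}
--     for c in lexema:
--         if c in caracter[estado]:
--             estado = caracter[estado][c]
--         else:
--             estado = -1
--             break
--     if estado == -1:
--         return estadoTrampa
--     if estado in estadoFinal:
--         return estado_final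
--     else:
--         return estadoNoFinal
-- ===== SOURCE B (Python) =====
-- estado_final = "estado final"
-- estadoNoFinal = "estado no aceptado"
-- estadoTrampa = "estado trampa"
--
-- def tokenElse(lexema):
--     target = "else"
--     if lexema == target:
--         return estado_final
--     elif target.startswith(lexema):
--         return estadoNoFinal
--     else:
--         return estadoTrampa
-- ===== Notes on version B (the rewrite author's own statement) =====
-- stated objective: simpler
-- what changed: Replaces the per-character DFA loop with a transition dictionary by a closed-form classification: exact match gives the final state, a proper prefix of 'else' gives the non-final state, anything else the trap state.
import Mathlib
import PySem

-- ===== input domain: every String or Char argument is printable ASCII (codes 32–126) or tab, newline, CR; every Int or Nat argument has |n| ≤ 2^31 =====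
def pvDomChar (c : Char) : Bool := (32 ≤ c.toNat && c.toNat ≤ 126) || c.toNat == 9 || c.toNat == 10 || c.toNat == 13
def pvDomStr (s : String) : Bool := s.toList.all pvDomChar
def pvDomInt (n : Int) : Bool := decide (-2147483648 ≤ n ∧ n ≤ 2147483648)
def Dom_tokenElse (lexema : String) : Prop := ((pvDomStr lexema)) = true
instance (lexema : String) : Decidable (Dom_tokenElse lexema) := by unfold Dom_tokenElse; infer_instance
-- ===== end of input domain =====

-- B replaces A's per-character DFA loop by a closed-form classification (equality + prefix test); simpler.

-- ===== PORT A =====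
-- the transition table caracter = {0:{'e':1},1:{'l':2},2:{'s':3},3:{'e':4},4:{}}
def tokenElseCaracter : PySem.Dict Int (PySem.Dict Char Int) :=
  PySem.Dict.ofList
    [(0, PySem.Dict.ofList [('e', 1)]),
     (1, PySem.Dict.ofList [('l', 2)]),
     (2, PySem.Dict.ofList [('s', 3)]),
     (3, PySem.Dict.ofList [('e', 4)]),
     (4, PySem.Dict.ofList [])]

-- the for-loop with its break; estado is always a key of caracter (0..4), so the
-- getD default for caracter[estado] is never used (KeyError impossible)
def tokenElseLoop (estado : Int) : List Char → Int
  | [] => estado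
  | c :: rest =>
    let fila := tokenElseCaracter.getD estado (PySem.Dict.ofList [])
    if fila.contains c then tokenElseLoop (fila.getD c 0) rest
    else -1  -- estado = -1; break

def tokenElse (lexema : String) : String :=
  let estado := tokenElseLoop 0 lexema.toList
  if estado = -1 then "estado trampa"
  else if ([4] : List Int).contains estado then "estado final"
  else "estado no aceptado"

-- ===== PORT B =====
def tokenElse_alt (lexema : String) : String :=
  let target := "else"
  if lexema == target then "estado final"
  else if PySem.Str.startswith target lexema then "estado no aceptado"
  else "estado trampa"

-- ===== PRECONDITION & SPEC =====
def Spec_tokenElse (lexema : String) (out : String) : Prop := out = tokenElse_alt lexema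
instance (lexema : String) (out : String) : Decidable (Spec_tokenElse lexema out) := by unfold Spec_tokenElse; infer_instance

-- ===== CLAIM (what is proved, stated in full; the proofs are below) =====
def Claim_equal_tokenElse : Prop := ∀ (lexema : String), Dom_tokenElse lexema → Spec_tokenElse lexema (tokenElse lexema)

-- ===== LEMMAS AND PROOFS =====

theorem tokenElse_key (l : List Char) :
    tokenElse (String.ofList l) = tokenElse_alt (String.ofList l) := by
  have helse : ("else" : String).toList = ['e', 'l', 's', 'e'] := by decide
  have hmk : tokenElseCaracter =
      PySem.Dict.mk
        [(0, PySem.Dict.mk [('e', 1)]),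
         (1, PySem.Dict.mk [('l', 2)]),
         (2, PySem.Dict.mk [('s', 3)]),
         (3, PySem.Dict.mk [('e', 4)]),
         (4, PySem.Dict.mk [])] := by decide
  unfold tokenElse tokenElse_alt
  simp only [String.toList_ofList, PySem.Str.startswith_eq, helse]
  by_cases heq : l = ['e', 'l', 's', 'e']
  · subst heq; decide
  · have hne : String.ofList l ≠ "else" := by
      intro h
      exact heq (by simpa [helse] using congrArg String.toList h)
    simp only [beq_iff_eq, if_neg hne]
    rcases l with _ | ⟨a, l⟩
    · decide
    by_cases ha : a = 'e'
    case neg =>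
      have ha' : ¬ ('e' = a) := fun h => ha h.symm
      simp [tokenElseLoop, hmk, PySem.Dict.getD, PySem.Dict.get?, PySem.Dict.contains,
        PySem.Chars.startswith_iff, List.cons_prefix_cons, ha, ha']
    subst ha
    rcases l with _ | ⟨b, l⟩
    · decide
    by_cases hb : b = 'l'
    case neg =>
      have hb' : ¬ ('l' = b) := fun h => hb h.symm
      simp [tokenElseLoop, hmk, PySem.Dict.getD, PySem.Dict.get?, PySem.Dict.contains,
        PySem.Chars.startswith_iff, List.cons_prefix_cons, hb, hb']
    subst hb
    rcases l with _ | ⟨c, l⟩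
    · decide
    by_cases hc : c = 's'
    case neg =>
      have hc' : ¬ ('s' = c) := fun h => hc h.symm
      simp [tokenElseLoop, hmk, PySem.Dict.getD, PySem.Dict.get?, PySem.Dict.contains,
        PySem.Chars.startswith_iff, List.cons_prefix_cons, hc, hc']
    subst hc
    rcases l with _ | ⟨d, l⟩
    · decide
    by_cases hd : d = 'e'
    case neg =>
      have hd' : ¬ ('e' = d) := fun h => hd h.symm
      simp [tokenElseLoop, hmk, PySem.Dict.getD, PySem.Dict.get?, PySem.Dict.contains,
        PySem.Chars.startswith_iff, List.cons_prefix_cons, hd, hd']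
    subst hd
    rcases l with _ | ⟨x, l⟩
    · exact absurd rfl heq
    have hnp : ¬ (('e' :: 'l' :: 's' :: 'e' :: x :: l) <+: ['e', 'l', 's', 'e']) := by
      intro h
      have := h.length_le
      simp at this
      omega
    simp [tokenElseLoop, hmk, PySem.Dict.getD, PySem.Dict.get?, PySem.Dict.contains,
      PySem.Chars.startswith_iff, hnp]

-- ===== VERDICT (by name: the statement is the Claim_ definition above) =====
theorem tokenElse_spec : Claim_equal_tokenElse := by
  intro lexema _
  unfold Spec_tokenElse
  have h := tokenElse_key lexema.toList
  rwa [String.ofList_toList] at h
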